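-- pv_equiv track=rewrite | github.com/PhenixDhinesh/My-PC-Backup | Python/hacker rank/Problem solving/electronic Shop.py | getMoneySpent
-- ===== SOURCE A (Python) =====
-- def getMoneySpent(keyboards, drives, b):
-- # here
--     l=[]
--     for i in range(len(keyboards)):
--         for j in range(len(drives)):
--             if keyboards[i]+drives[j]<=b:
--                 l.append(keyboards[i]+drives[j])
--     if len(l)==0:
--         return -1
--     else:
--         return max(l)
-- ===== SOURCE B (Python) =====
-- def getMoneySpent(keyboards, drives, b):
--     ds = sorted(drives)
--     best = None
--     for k in keyboards:
--         # binary search: lo becomes the number of drives <= b - k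
--         lo, hi = 0, len(ds)
--         while lo < hi:
--             mid = (lo + hi) // 2
--             if ds[mid] <= b - k:
--                 lo = mid + 1
--             else:
--                 hi = mid
--         if lo > 0:
--             s = k + ds[lo - 1]
--             if best is None or s > best:
--                 best = s
--     return best if best is not None else -1
-- ===== Notes on version B (the rewrite author's own statement) =====
-- stated objective: faster
-- what changed: Instead of collecting every affordable keyboard+drive sum into a list and taking its max (nested scans), B sorts the drives once and for each keyboard binary-searches the largest drive within the remaining budget, tracking a running best.
import Mathlib
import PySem

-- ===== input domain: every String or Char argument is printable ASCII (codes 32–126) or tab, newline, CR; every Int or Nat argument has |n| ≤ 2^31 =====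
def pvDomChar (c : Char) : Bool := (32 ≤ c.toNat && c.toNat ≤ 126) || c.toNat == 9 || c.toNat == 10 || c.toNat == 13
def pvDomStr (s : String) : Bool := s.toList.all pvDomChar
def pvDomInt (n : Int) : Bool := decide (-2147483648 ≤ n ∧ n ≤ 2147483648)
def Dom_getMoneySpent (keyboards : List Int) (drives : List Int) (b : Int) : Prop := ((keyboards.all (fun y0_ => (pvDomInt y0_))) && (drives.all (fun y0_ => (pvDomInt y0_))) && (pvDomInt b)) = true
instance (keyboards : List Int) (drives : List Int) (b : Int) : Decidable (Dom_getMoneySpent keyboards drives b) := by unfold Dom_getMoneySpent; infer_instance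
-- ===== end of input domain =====

-- B sorts the drives once and binary-searches per keyboard instead of scanning all pairs; equivalence proved on all inputs.

-- ===== PORT A =====
-- literal port: build the list l of all affordable sums, return -1 if empty else max(l)
def getMoneySpent (keyboards : List Int) (drives : List Int) (b : Int) : Int :=
  let l : List Int :=
    (PySem.List.pyRange 0 (PySem.List.len keyboards)).foldl (fun acc i =>
      (PySem.List.pyRange 0 (PySem.List.len drives)).foldl (fun acc2 j =>
        if PySem.List.pyGetD keyboards i 0 + PySem.List.pyGetD drives j 0 ≤ b then
          acc2 ++ [PySem.List.pyGetD keyboards i 0 + PySem.List.pyGetD drives j 0]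
        else acc2) acc) []
  if PySem.List.len l = 0 then -1
  else (PySem.List.max? l (fun x => x)).getD (-1)   -- max(l); l is nonempty in this branch

-- ===== PORT B =====
-- the while-loop of Source B: lo/hi are nonnegative Python ints, so Nat with Nat division is exact
def pvBsearch (ds : List Int) (x : Int) (lo hi : Nat) : Nat :=
  if _h : lo < hi then
    let mid := (lo + hi) / 2
    if PySem.List.pyGetD ds (mid : Int) 0 ≤ x then pvBsearch ds x (mid + 1) hi
    else pvBsearch ds x lo mid
  else lo
termination_by hi - lo
decreasing_by all_goals omega

def getMoneySpent_alt (keyboards : List Int) (drives : List Int) (b : Int) : Int :=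
  let ds := PySem.List.sorted drives (fun x => x) false
  let best := keyboards.foldl (fun best k =>
    let lo := pvBsearch ds (b - k) 0 ds.length
    if lo > 0 then
      let s := k + PySem.List.pyGetD ds ((lo : Int) - 1) 0
      match best with
      | none => some s
      | some m => if s > m then some s else best
    else best) (none : Option Int)
  match best with
  | some m => m
  | none => -1

-- ===== PRECONDITION & SPEC =====
def Spec_getMoneySpent (keyboards : List Int) (drives : List Int) (b : Int) (out : Int) : Prop := out = getMoneySpent_alt keyboards drives b
instance (keyboards : List Int) (drives : List Int) (b : Int) (out : Int) : Decidable (Spec_getMoneySpent keyboards drives b out) := by unfold Spec_getMoneySpent; infer_instance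

-- ===== CLAIM (what is proved, stated in full; the proofs are below) =====
def Claim_equal_getMoneySpent : Prop := ∀ (keyboards : List Int) (drives : List Int) (b : Int), Dom_getMoneySpent keyboards drives b → Spec_getMoneySpent keyboards drives b (getMoneySpent keyboards drives b)

-- ===== LEMMAS AND PROOFS =====

-- the set of affordable sums, as a list
def pvSums (keyboards drives : List Int) (b : Int) : List Int :=
  keyboards.flatMap (fun k => (drives.filter (fun d => k + d ≤ b)).map (fun d => k + d))

theorem pvSums_nil (drives : List Int) (b : Int) : pvSums [] drives b = [] := rfl

theorem pvSums_cons (k : Int) (t drives : List Int) (b : Int) :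
    pvSums (k :: t) drives b
      = (drives.filter (fun d => k + d ≤ b)).map (fun d => k + d) ++ pvSums t drives b := by
  simp [pvSums]

-- A's inner loop appends exactly the affordable sums for one keyboard
theorem pvInner (k b : Int) (drives : List Int) (acc : List Int) :
    drives.foldl (fun acc2 d => if k + d ≤ b then acc2 ++ [k + d] else acc2) acc
      = acc ++ (drives.filter (fun d => k + d ≤ b)).map (fun d => k + d) := by
  induction drives generalizing acc with
  | nil => simp
  | cons d t ih =>
    by_cases h : k + d ≤ b <;> simp [h, ih]

-- A's built list is pvSums
theorem pvA_list (keyboards drives : List Int) (b : Int) :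
    (PySem.List.pyRange 0 (PySem.List.len keyboards)).foldl (fun acc i =>
      (PySem.List.pyRange 0 (PySem.List.len drives)).foldl (fun acc2 j =>
        if PySem.List.pyGetD keyboards i 0 + PySem.List.pyGetD drives j 0 ≤ b then
          acc2 ++ [PySem.List.pyGetD keyboards i 0 + PySem.List.pyGetD drives j 0]
        else acc2) acc) []
      = pvSums keyboards drives b := by
  have hin : ∀ (k : Int) (acc : List Int),
      (PySem.List.pyRange 0 (PySem.List.len drives)).foldl (fun acc2 j =>
        if k + PySem.List.pyGetD drives j 0 ≤ b then acc2 ++ [k + PySem.List.pyGetD drives j 0]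
        else acc2) acc
      = acc ++ (drives.filter (fun d => k + d ≤ b)).map (fun d => k + d) := by
    intro k acc
    rw [PySem.List.foldl_pyRange_zero_pyGetD drives 0
      (fun acc2 d => if k + d ≤ b then acc2 ++ [k + d] else acc2) acc]
    exact pvInner k b drives acc
  simp only [hin]
  rw [PySem.List.foldl_pyRange_zero_pyGetD keyboards 0
    (fun acc k => acc ++ (drives.filter (fun d => k + d ≤ b)).map (fun d => k + d)) []]
  rw [PySem.List.foldl_append_eq_flatMap]
  rfl

-- the binary-search loop invariantly returns a split point of ds around x
theorem pvBsearch_spec (ds : List Int) (x : Int) (hs : ds.Pairwise (· ≤ ·)) :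
    ∀ (lo hi : Nat), lo ≤ hi → hi ≤ ds.length →
    (∀ j (h : j < ds.length), j < lo → ds[j] ≤ x) →
    (∀ j (h : j < ds.length), hi ≤ j → x < ds[j]) →
    pvBsearch ds x lo hi ≤ ds.length ∧
      (∀ j (h : j < ds.length), j < pvBsearch ds x lo hi → ds[j] ≤ x) ∧
      (∀ j (h : j < ds.length), pvBsearch ds x lo hi ≤ j → x < ds[j]) := by
  have hmono := List.pairwise_iff_getElem.mp hs
  suffices H : ∀ (n lo hi : Nat), hi - lo = n → lo ≤ hi → hi ≤ ds.length →
      (∀ j (h : j < ds.length), j < lo → ds[j] ≤ x) →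
      (∀ j (h : j < ds.length), hi ≤ j → x < ds[j]) →
      pvBsearch ds x lo hi ≤ ds.length ∧
        (∀ j (h : j < ds.length), j < pvBsearch ds x lo hi → ds[j] ≤ x) ∧
        (∀ j (h : j < ds.length), pvBsearch ds x lo hi ≤ j → x < ds[j]) by
    intro lo hi hle hhi h1 h2
    exact H (hi - lo) lo hi rfl hle hhi h1 h2
  intro n
  induction n using Nat.strong_induction_on with
  | _ n ih =>
    intro lo hi hn hle hhi hlow hhigh
    rw [pvBsearch]
    by_cases h : lo < hi
    · simp only [dif_pos h]
      have hmidlt : (lo + hi) / 2 < hi := by omega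
      have hmidge : lo ≤ (lo + hi) / 2 := by omega
      have hmidlen : (lo + hi) / 2 < ds.length := by omega
      have hg : PySem.List.pyGetD ds (((lo + hi) / 2 : Nat) : Int) 0 = ds[(lo + hi) / 2] := by
        rw [PySem.List.pyGetD_natCast]
        exact List.getD_eq_getElem ds 0 hmidlen
      rw [hg]
      by_cases hc : ds[(lo + hi) / 2] ≤ x
      · simp only [if_pos hc]
        refine ih (hi - ((lo + hi) / 2 + 1)) (by omega) _ _ rfl (by omega) hhi ?_ hhigh
        intro j hj hjlt
        rcases Nat.lt_or_ge j ((lo + hi) / 2) with hj2 | hj2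
        · exact le_trans (hmono j ((lo + hi) / 2) hj hmidlen hj2) hc
        · have : j = (lo + hi) / 2 := by omega
          subst this; exact hc
      · simp only [if_neg hc]
        refine ih ((lo + hi) / 2 - lo) (by omega) _ _ rfl (by omega) (by omega) hlow ?_
        intro j hj hjge
        rcases Nat.lt_or_ge ((lo + hi) / 2) j with hj2 | hj2
        · exact lt_of_lt_of_le (lt_of_not_ge hc) (hmono ((lo + hi) / 2) j hmidlen hj hj2)
        · have : j = (lo + hi) / 2 := by omega
          subst this; exact lt_of_not_ge hc
    · simp only [dif_neg h]
      have : lo = hi := by omega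
      subst this
      exact ⟨hhi, hlow, hhigh⟩

-- per-keyboard: the binary-search candidate is the max of that keyboard's affordable sums
theorem pvStep (drives : List Int) (k b : Int) :
    (pvBsearch (PySem.List.sorted drives (fun x => x) false) (b - k) 0
        (PySem.List.sorted drives (fun x => x) false).length = 0 →
      (drives.filter (fun d => k + d ≤ b)).map (fun d => k + d) = []) ∧
    (∀ r, pvBsearch (PySem.List.sorted drives (fun x => x) false) (b - k) 0
        (PySem.List.sorted drives (fun x => x) false).length = r → 0 < r →
      (k + PySem.List.pyGetD (PySem.List.sorted drives (fun x => x) false) ((r : Int) - 1) 0)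
          ∈ (drives.filter (fun d => k + d ≤ b)).map (fun d => k + d) ∧
      ∀ y ∈ (drives.filter (fun d => k + d ≤ b)).map (fun d => k + d),
        y ≤ k + PySem.List.pyGetD (PySem.List.sorted drives (fun x => x) false) ((r : Int) - 1) 0) := by
  set ds := PySem.List.sorted drives (fun x => x) false with hds
  have hpw : ds.Pairwise (· ≤ ·) := PySem.List.sorted_pairwise drives (fun x => x)
  have hmem : ∀ d : Int, d ∈ ds ↔ d ∈ drives := fun d =>
    (PySem.List.sorted_perm drives (fun x => x) false).mem_iff
  obtain ⟨hrle, hbelow, habove⟩ :=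
    pvBsearch_spec ds (b - k) hpw 0 ds.length (Nat.zero_le _) (le_refl _)
      (by intro j hj hcon; omega) (by intro j hj hcon; omega)
  set r := pvBsearch ds (b - k) 0 ds.length with hr
  have hmono := List.pairwise_iff_getElem.mp hpw
  constructor
  · intro h0
    have hfilt : drives.filter (fun d => k + d ≤ b) = [] := by
      rw [List.filter_eq_nil_iff]
      intro d hd
      obtain ⟨j, hj, hje⟩ := List.mem_iff_getElem.mp ((hmem d).mpr hd)
      have := habove j hj (by omega)
      simp only [decide_eq_true_eq]
      omega
    rw [hfilt]; rfl
  · intro r' hr' hpos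
    subst hr'
    have hr1 : r - 1 < ds.length := by omega
    have hgd : PySem.List.pyGetD ds ((r : Int) - 1) 0 = ds[r - 1] := by
      have : ((r : Int) - 1) = ((r - 1 : Nat) : Int) := by omega
      rw [this, PySem.List.pyGetD_natCast]
      exact List.getD_eq_getElem ds 0 hr1
    rw [hgd]
    have hcle : ds[r - 1] ≤ b - k := hbelow (r - 1) hr1 (by omega)
    constructor
    · exact List.mem_map.mpr ⟨ds[r - 1],
        List.mem_filter.mpr ⟨(hmem _).mp (List.getElem_mem hr1), by simp; omega⟩, rfl⟩
    · intro y hy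
      obtain ⟨d, hdf, hde⟩ := List.mem_map.mp hy
      obtain ⟨hdd, hdle⟩ := List.mem_filter.mp hdf
      have hdle' : k + d ≤ b := by simpa using hdle
      obtain ⟨j, hj, hje⟩ := List.mem_iff_getElem.mp ((hmem d).mpr hdd)
      have hjlt : j < r := by
        by_contra hcon
        have := habove j hj (by omega)
        omega
      have hdc : d ≤ ds[r - 1] := by
        rcases Nat.lt_or_ge j (r - 1) with hj2 | hj2
        · rw [← hje]; exact hmono j (r - 1) hj hr1 hj2
        · have : j = r - 1 := by omega
          subst this; omega
      omega

-- B's fold invariant: best is none iff no affordable sum so far, else the max of them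
theorem pvB_fold (drives : List Int) (b : Int) : ∀ (keyboards : List Int) (best : Option Int)
    (S : List Int),
    (best = none → S = []) →
    (∀ m, best = some m → m ∈ S ∧ ∀ y ∈ S, y ≤ m) →
    (keyboards.foldl (fun best k =>
        let lo := pvBsearch (PySem.List.sorted drives (fun x => x) false) (b - k)
          0 (PySem.List.sorted drives (fun x => x) false).length
        if lo > 0 then
          let s := k + PySem.List.pyGetD (PySem.List.sorted drives (fun x => x) false) ((lo : Int) - 1) 0
          match best with
          | none => some s
          | some m => if s > m then some s else best
        else best) best = none → S ++ pvSums keyboards drives b = []) ∧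
    (∀ m, keyboards.foldl (fun best k =>
        let lo := pvBsearch (PySem.List.sorted drives (fun x => x) false) (b - k)
          0 (PySem.List.sorted drives (fun x => x) false).length
        if lo > 0 then
          let s := k + PySem.List.pyGetD (PySem.List.sorted drives (fun x => x) false) ((lo : Int) - 1) 0
          match best with
          | none => some s
          | some m => if s > m then some s else best
        else best) best = some m →
      m ∈ S ++ pvSums keyboards drives b ∧ ∀ y ∈ S ++ pvSums keyboards drives b, y ≤ m) := by
  intro keyboards
  induction keyboards with
  | nil =>
    intro best S hnone hsome
    simp only [List.foldl_nil, pvSums_nil, List.append_nil]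
    exact ⟨hnone, hsome⟩
  | cons k t ih =>
    intro best S hnone hsome
    simp only [List.foldl_cons, pvSums_cons, ← List.append_assoc]
    set ds := PySem.List.sorted drives (fun x => x) false with hds
    set Lk := (drives.filter (fun d => k + d ≤ b)).map (fun d => k + d) with hLk
    obtain ⟨hstep0, hsteppos⟩ := pvStep drives k b
    set lo := pvBsearch ds (b - k) 0 ds.length with hlo
    by_cases hpos : lo > 0
    · have hc := hsteppos lo rfl hpos
      set c := k + PySem.List.pyGetD ds ((lo : Int) - 1) 0 with hcdef
      have hcm : c ∈ Lk := hc.1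
      have hcu : ∀ y ∈ Lk, y ≤ c := hc.2
      simp only [if_pos hpos]
      cases best with
      | none =>
        have hS : S = [] := hnone rfl
        subst hS
        refine ih (some c) Lk ?_ ?_
        · intro h; cases h
        · intro m hm
          have : m = c := (Option.some.inj hm).symm
          subst this
          exact ⟨by simpa using hcm, by simpa using hcu⟩
      | some m =>
        obtain ⟨hmS, hmub⟩ := hsome m rfl
        by_cases hgt : c > m
        · simp only [if_pos hgt]
          refine ih (some c) (S ++ Lk) ?_ ?_
          · intro h; cases h
          · intro m' hm'
            have : m' = c := (Option.some.inj hm').symm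
            subst this
            refine ⟨List.mem_append.mpr (Or.inr hcm), ?_⟩
            intro y hy
            rcases List.mem_append.mp hy with hy | hy
            · exact le_trans (hmub y hy) (le_of_lt hgt)
            · exact hcu y hy
        · simp only [if_neg hgt]
          refine ih (some m) (S ++ Lk) ?_ ?_
          · intro h; cases h
          · intro m' hm'
            have : m' = m := (Option.some.inj hm').symm
            subst this
            refine ⟨List.mem_append.mpr (Or.inl hmS), ?_⟩
            intro y hy
            rcases List.mem_append.mp hy with hy | hy
            · exact hmub y hy
            · exact le_trans (hcu y hy) (by omega)
    · have hL : Lk = [] := hstep0 (by omega)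
      simp only [if_neg hpos, hL, List.append_nil]
      exact ih best S hnone hsome

-- ===== VERDICT (by name: the statement is the Claim_ definition above) =====
theorem getMoneySpent_spec : Claim_equal_getMoneySpent := by
  intro keyboards drives b _
  unfold Spec_getMoneySpent getMoneySpent getMoneySpent_alt
  simp only [pvA_list]
  obtain ⟨h1, h2⟩ := pvB_fold drives b keyboards none []
    (fun _ => rfl) (fun m h => by cases h)
  simp only [List.nil_append] at h1 h2
  cases hres : keyboards.foldl (fun best k =>
      let lo := pvBsearch (PySem.List.sorted drives (fun x => x) false) (b - k)
        0 (PySem.List.sorted drives (fun x => x) false).length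
      if lo > 0 then
        let s := k + PySem.List.pyGetD (PySem.List.sorted drives (fun x => x) false) ((lo : Int) - 1) 0
        match best with
        | none => some s
        | some m => if s > m then some s else best
      else best) (none : Option Int) with
  | none =>
    have hS : pvSums keyboards drives b = [] := h1 hres
    simp [hS, PySem.List.len]
  | some m =>
    obtain ⟨hmem, hub⟩ := h2 m hres
    have hne : pvSums keyboards drives b ≠ [] := fun h => by simp [h] at hmem
    have hlen : ¬ (PySem.List.len (pvSums keyboards drives b) = 0) := by
      simp [PySem.List.len]
      exact hne
    rw [if_neg hlen]
    cases hm : PySem.List.max? (pvSums keyboards drives b) (fun x => x) with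
    | none => exact absurd ((PySem.List.max?_eq_none_iff _ _).mp hm) hne
    | some m' =>
      have hm'mem : m' ∈ pvSums keyboards drives b := PySem.List.max?_mem hm
      have hm'ub : ∀ y ∈ pvSums keyboards drives b, y ≤ m' := PySem.List.max?_isMax hm
      have : m' = m := le_antisymm (hub m' hm'mem) (hm'ub m hmem)
      simp [this]
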